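-- pv_equiv track=rewrite | github.com/Patchkat/Advent-Of-Code-2020 | Day 17/AoC17B.py | inactive_neighbors
-- ===== SOURCE A (Python) =====
-- def inactive_neighbors(coords):
--     inactive = set()
--     for coord in coords:
--         for x in range(coord[0] - 1, coord[0] + 2):
--             for y in range(coord[1] - 1, coord[1] + 2):
--                 for z in range(coord[2] - 1, coord[2] + 2):
--                     for w in range(coord[3] - 1, coord[3] + 2):
--                         if (x, y, z, w) not in coords and (x, y, z, w) != coord:
--                             inactive.add((x, y, z, w))
--     return inactive
-- ===== SOURCE B (Python) =====
-- def inactive_neighbors(coords):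
--     # Staged axis-wise expansion: the 4D Moore box is a product of 1D intervals,
--     # so expanding the whole population along one axis at a time (four passes)
--     # yields exactly the union of all 3^4 boxes; one set-difference removes actives.
--     region = list(coords)
--     for axis in range(4):
--         region = [c[:axis] + (c[axis] + d,) + c[axis + 1:]
--                   for c in region for d in (-1, 0, 1)]
--     return set(region) - set(coords)
-- ===== Notes on version B (the rewrite author's own statement) =====
-- stated objective: alternative
-- what changed: A's per-cell nested x/y/z/w loops with an inline membership test are replaced by four staged whole-population passes, each expanding every tuple along one axis by {-1,0,1} (valid because the 4D Moore box is a product of 1D intervals), followed by a single bulk set-difference against the active set.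
import Mathlib
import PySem

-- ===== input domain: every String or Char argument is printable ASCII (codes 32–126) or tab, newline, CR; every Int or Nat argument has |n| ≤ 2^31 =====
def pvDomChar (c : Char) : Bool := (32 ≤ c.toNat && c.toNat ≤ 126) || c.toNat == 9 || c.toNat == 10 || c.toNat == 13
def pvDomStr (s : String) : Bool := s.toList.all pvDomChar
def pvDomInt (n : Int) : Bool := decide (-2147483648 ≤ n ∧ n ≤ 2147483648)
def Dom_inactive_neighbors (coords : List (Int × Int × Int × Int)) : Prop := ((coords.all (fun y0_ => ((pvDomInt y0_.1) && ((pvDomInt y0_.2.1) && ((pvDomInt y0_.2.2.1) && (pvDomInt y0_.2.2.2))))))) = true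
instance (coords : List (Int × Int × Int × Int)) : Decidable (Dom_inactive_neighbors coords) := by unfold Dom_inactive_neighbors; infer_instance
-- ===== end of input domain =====

-- B replaces A's per-cell nested coordinate loops with an inline membership test by
-- four staged whole-population passes, each expanding every tuple along one axis by
-- {-1,0,1} (the 4D Moore box is a product of 1D intervals), then one set-difference
-- against the active set (objective: alternative; same cost class).

-- ===== PORT A =====
def inactive_neighbors (coords : List (Int × Int × Int × Int)) : List (Int × Int × Int × Int) :=
  coords.foldl (fun inactive coord =>
    (PySem.List.pyRange (coord.1 - 1) (coord.1 + 2) 1).foldl (fun inactive x =>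
      (PySem.List.pyRange (coord.2.1 - 1) (coord.2.1 + 2) 1).foldl (fun inactive y =>
        (PySem.List.pyRange (coord.2.2.1 - 1) (coord.2.2.1 + 2) 1).foldl (fun inactive z =>
          (PySem.List.pyRange (coord.2.2.2 - 1) (coord.2.2.2 + 2) 1).foldl (fun inactive w =>
            if (x, y, z, w) ∉ coords ∧ (x, y, z, w) ≠ coord then
              PySem.Set.add inactive (x, y, z, w)
            else inactive)
          inactive)
        inactive)
      inactive)
    inactive)
  PySem.Set.empty

-- ===== PORT B =====
-- c[:axis] + (c[axis] + d,) + c[axis+1:] on a 4-tuple, for axis ∈ range(4)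
def expandAxis (axis : Int) (c : Int × Int × Int × Int) (d : Int) : Int × Int × Int × Int :=
  if axis = 0 then (c.1 + d, c.2.1, c.2.2.1, c.2.2.2)
  else if axis = 1 then (c.1, c.2.1 + d, c.2.2.1, c.2.2.2)
  else if axis = 2 then (c.1, c.2.1, c.2.2.1 + d, c.2.2.2)
  else (c.1, c.2.1, c.2.2.1, c.2.2.2 + d)

def inactive_neighbors_alt (coords : List (Int × Int × Int × Int)) : List (Int × Int × Int × Int) :=
  let region := (PySem.List.pyRange 0 4 1).foldl
    (fun region axis => region.flatMap fun c => ([-1, 0, 1] : List Int).map (expandAxis axis c))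
    coords
  PySem.Set.diff (PySem.Set.ofList region) (PySem.Set.ofList coords)

-- ===== PRECONDITION & SPEC =====
def Spec_inactive_neighbors (coords : List (Int × Int × Int × Int)) (out : List (Int × Int × Int × Int)) : Prop := out = inactive_neighbors_alt coords
instance (coords : List (Int × Int × Int × Int)) (out : List (Int × Int × Int × Int)) : Decidable (Spec_inactive_neighbors coords out) := by unfold Spec_inactive_neighbors; infer_instance

-- ===== CLAIM (what is proved, stated in full; the proofs are below) =====
def Claim_equal_inactive_neighbors : Prop := ∀ (coords : List (Int × Int × Int × Int)), Dom_inactive_neighbors coords → Spec_inactive_neighbors coords (inactive_neighbors coords)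

-- ===== LEMMAS AND PROOFS =====

-- guarded insertion step shared by both characterisations
def stepG (coords : List (Int × Int × Int × Int)) (s : List (Int × Int × Int × Int))
    (t : Int × Int × Int × Int) : List (Int × Int × Int × Int) :=
  if t ∉ coords then PySem.Set.add s t else s

-- the full 3^4 box of a cell, in A's lexicographic loop order
def box4 (c : Int × Int × Int × Int) : List (Int × Int × Int × Int) :=
  ([-1, 0, 1] : List Int).flatMap fun dx =>
  ([-1, 0, 1] : List Int).flatMap fun dy =>
  ([-1, 0, 1] : List Int).flatMap fun dz =>
  ([-1, 0, 1] : List Int).map fun dw =>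
    (c.1 + dx, c.2.1 + dy, c.2.2.1 + dz, c.2.2.2 + dw)

lemma range3 (a : Int) :
    PySem.List.pyRange (a - 1) (a + 2) 1 = ([-1, 0, 1] : List Int).map (fun d => a + d) := by
  rw [PySem.List.pyRange_one_cons (by omega), PySem.List.pyRange_one_cons (by omega),
      PySem.List.pyRange_one_cons (by omega), PySem.List.pyRange_one_eq_nil (by omega)]
  simp only [List.map_cons, List.map_nil, List.cons.injEq, and_true]
  refine ⟨by omega, by omega, by omega⟩

lemma filter_add (p : (Int × Int × Int × Int) → Bool) (s : List (Int × Int × Int × Int))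
    (x : Int × Int × Int × Int) :
    (PySem.Set.add s x).filter p =
      if p x then PySem.Set.add (s.filter p) x else s.filter p := by
  by_cases hx : x ∈ s
  · have h1 : PySem.Set.add s x = s := by simp [PySem.Set.add, hx]
    rw [h1]
    by_cases hp : p x
    · have hxf : x ∈ s.filter p := List.mem_filter.mpr ⟨hx, hp⟩
      have h2 : PySem.Set.add (s.filter p) x = s.filter p := by simp [PySem.Set.add, hxf]
      rw [if_pos hp, h2]
    · rw [if_neg hp]
  · have h1 : PySem.Set.add s x = s ++ [x] := by simp [PySem.Set.add, hx]
    have hxf : x ∉ s.filter p := fun h => hx (List.mem_filter.mp h).1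
    rw [h1, List.filter_append]
    by_cases hp : p x
    · have h2 : PySem.Set.add (s.filter p) x = s.filter p ++ [x] := by
        simp [PySem.Set.add, hxf]
      rw [if_pos hp, h2]
      simp [hp]
    · rw [if_neg hp]
      simp [hp]

lemma filter_foldl_add (p : (Int × Int × Int × Int) → Bool) :
    ∀ (xs s : List (Int × Int × Int × Int)),
      (xs.foldl PySem.Set.add s).filter p =
        xs.foldl (fun s t => if p t then PySem.Set.add s t else s) (s.filter p) := by
  intro xs
  induction xs with
  | nil => intro s; simp
  | cons x xs ih =>
      intro s
      simp only [List.foldl_cons, ih, filter_add]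

lemma contains_ofList_eq (coords : List (Int × Int × Int × Int)) (t : Int × Int × Int × Int) :
    (!(PySem.Set.ofList coords).contains t) = decide (t ∉ coords) := by
  by_cases h : t ∈ coords
  · simp [h]
  · have hc : ¬ (PySem.Set.ofList coords).contains t = true := fun hc =>
      h ((PySem.Set.mem_ofList coords t).mp ((PySem.Set.contains_iff _ t).mp hc))
    simp [h]

-- the four staged axis expansions compose into one flatMap of full boxes
lemma staged_eq_box4 (coords : List (Int × Int × Int × Int)) :
    (PySem.List.pyRange 0 4 1).foldl
      (fun region axis => region.flatMap fun c => ([-1, 0, 1] : List Int).map (expandAxis axis c))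
      coords = coords.flatMap box4 := by
  have h4 : PySem.List.pyRange 0 4 1 = [0, 1, 2, 3] := by decide
  rw [h4]
  simp only [List.foldl_cons, List.foldl_nil, List.flatMap_assoc, List.flatMap_map]
  congr 1

-- per-coordinate: A's nested range loops are the stepG-fold over the cell's box
lemma inner_eq_box4 (coords : List (Int × Int × Int × Int)) (c : Int × Int × Int × Int)
    (hc : c ∈ coords) (s : List (Int × Int × Int × Int)) :
    ((PySem.List.pyRange (c.1 - 1) (c.1 + 2) 1).foldl (fun inactive x =>
      (PySem.List.pyRange (c.2.1 - 1) (c.2.1 + 2) 1).foldl (fun inactive y =>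
        (PySem.List.pyRange (c.2.2.1 - 1) (c.2.2.1 + 2) 1).foldl (fun inactive z =>
          (PySem.List.pyRange (c.2.2.2 - 1) (c.2.2.2 + 2) 1).foldl (fun inactive w =>
            if (x, y, z, w) ∉ coords ∧ (x, y, z, w) ≠ c then
              PySem.Set.add inactive (x, y, z, w)
            else inactive)
          inactive)
        inactive)
      inactive)
    s) = (box4 c).foldl (stepG coords) s := by
  simp only [range3, box4, List.foldl_map, List.foldl_flatMap]
  apply PySem.List.foldl_congr_mem; intro a1 dx _
  apply PySem.List.foldl_congr_mem; intro a2 dy _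
  apply PySem.List.foldl_congr_mem; intro a3 dz _
  apply PySem.List.foldl_congr_mem; intro a4 dw _
  rw [stepG]
  by_cases h : (c.1 + dx, c.2.1 + dy, c.2.2.1 + dz, c.2.2.2 + dw) ∈ coords
  · simp [h]
  · have hne : (c.1 + dx, c.2.1 + dy, c.2.2.1 + dz, c.2.2.2 + dw) ≠ c := fun he => h (he.symm ▸ hc)
    simp [h, hne]

-- ===== VERDICT (by name: the statement is the Claim_ definition above) =====
theorem inactive_neighbors_spec : Claim_equal_inactive_neighbors := by
  intro coords _
  show inactive_neighbors coords = inactive_neighbors_alt coords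
  have hB : inactive_neighbors_alt coords =
      (coords.flatMap box4).foldl (stepG coords) PySem.Set.empty := by
    show PySem.Set.diff _ _ = _
    rw [staged_eq_box4, PySem.Set.diff]
    simp only [contains_ofList_eq]
    rw [PySem.Set.ofList, filter_foldl_add]
    have h0 : PySem.Set.empty.filter
        (fun t : Int × Int × Int × Int => decide (t ∉ coords)) = PySem.Set.empty := rfl
    rw [h0]
    apply PySem.List.foldl_congr_mem
    intro acc t _
    rw [stepG]
    by_cases h : t ∈ coords <;> simp [h]
  rw [hB, inactive_neighbors, List.foldl_flatMap]
  apply PySem.List.foldl_congr_mem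
  intro acc c hcmem
  exact inner_eq_box4 coords c hcmem acc
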